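-- pv_equiv track=rewrite | github.com/hshk99/Autopack | src/autopack/pattern_matcher.py | _filter_anchor_dirs
-- ===== SOURCE A (Python) =====
-- from typing import Dict, List, Optional
--
-- def _filter_anchor_dirs(anchors: List[str], allowed_roots: List[str]) -> List[str]:
--     """Keep only anchors that fall under allowed anchor roots."""
--     if not anchors or not allowed_roots:
--         return []
--     allowed = []
--     allowed_norm = [a.rstrip("/") for a in allowed_roots if a]
--     for anchor in anchors:
--         anchor_clean = (anchor or "").rstrip("/")
--         if not anchor_clean:
--             continue
--         for root in allowed_norm:
--             if anchor_clean == root or anchor_clean.startswith(root + "/"):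
--                 allowed.append(anchor_clean + "/")
--                 break
--     return sorted(set(allowed))
-- ===== SOURCE B (Python) =====
-- def _filter_anchor_dirs(anchors, allowed_roots):
--     """Keep only anchors that fall under allowed anchor roots (set-based)."""
--     roots = {a.rstrip("/") for a in allowed_roots if a}
--     result = set()
--     for anchor in anchors:
--         clean = (anchor or "").rstrip("/")
--         if not clean:
--             continue
--         prefixes = [clean[:i] for i, c in enumerate(clean) if c == "/"]
--         prefixes.append(clean)
--         if any(p in roots for p in prefixes):
--             result.add(clean + "/")
--     return sorted(result)
-- ===== Notes on version B (the rewrite author's own statement) =====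
-- stated objective: faster
-- what changed: B puts the normalized roots in a hash set and tests each anchor's path-boundary prefixes for membership, replacing A's inner scan over all roots with string startswith checks.
import Mathlib
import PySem

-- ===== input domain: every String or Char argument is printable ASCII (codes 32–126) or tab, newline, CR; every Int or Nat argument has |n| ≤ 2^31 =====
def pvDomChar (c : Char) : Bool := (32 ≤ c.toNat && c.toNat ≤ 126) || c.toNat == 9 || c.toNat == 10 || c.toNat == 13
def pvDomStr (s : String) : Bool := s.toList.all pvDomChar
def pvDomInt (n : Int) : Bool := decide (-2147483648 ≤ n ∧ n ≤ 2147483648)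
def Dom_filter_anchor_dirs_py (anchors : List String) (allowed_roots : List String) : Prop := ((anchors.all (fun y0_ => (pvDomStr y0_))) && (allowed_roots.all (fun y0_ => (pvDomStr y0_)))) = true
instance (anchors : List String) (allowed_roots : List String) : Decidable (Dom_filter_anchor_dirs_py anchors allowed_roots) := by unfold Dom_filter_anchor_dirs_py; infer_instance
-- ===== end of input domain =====

-- B replaces A's inner scan over all roots by a set of roots queried at each path-boundary prefix of the anchor.
-- Both ports work on code-point lists (String.toList) and rebuild Strings at the end; string order and rstrip("/") are exact there.

-- hand port of str.rstrip("/") on code points (exact: drops exactly the trailing '/' characters)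
def rstripSlash (cs : List Char) : List Char := (cs.reverse.dropWhile (fun c => c == '/')).reverse

-- ===== PORT A =====
def filter_anchor_dirs_py (anchors : List String) (allowed_roots : List String) : List String :=
  if anchors = [] ∨ allowed_roots = [] then []
  else
    let allowed_norm := (allowed_roots.filter (fun a => a.toList ≠ [])).map (fun a => rstripSlash a.toList)
    let allowed := anchors.foldl (fun acc anchor =>
      if rstripSlash anchor.toList = [] then acc
      else if allowed_norm.any (fun root => rstripSlash anchor.toList == root || PySem.Chars.startswith (rstripSlash anchor.toList) (root ++ ['/'])) then
        acc ++ [rstripSlash anchor.toList ++ ['/']]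
      else acc) []
    (PySem.List.sorted (PySem.Set.ofList allowed) (fun x => x) false).map String.ofList

-- ===== PORT B =====
-- path-boundary prefixes: clean[:i] for every i with clean[i] = '/', plus clean itself
def bprefixes (cs : List Char) : List (List Char) :=
  ((List.range cs.length).filterMap (fun i => if cs[i]? = some '/' then some (cs.take i) else none)) ++ [cs]

def filter_anchor_dirs_py_alt (anchors : List String) (allowed_roots : List String) : List String :=
  let roots : PySem.Set (List Char) :=
    PySem.Set.ofList ((allowed_roots.filter (fun a => a.toList ≠ [])).map (fun a => rstripSlash a.toList))
  let result := anchors.foldl (fun acc anchor =>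
    if rstripSlash anchor.toList = [] then acc
    else if (bprefixes (rstripSlash anchor.toList)).any (fun p => PySem.Set.contains roots p) then
      PySem.Set.add acc (rstripSlash anchor.toList ++ ['/'])
    else acc) ([] : PySem.Set (List Char))
  (PySem.List.sorted result (fun x => x) false).map String.ofList

-- ===== PRECONDITION & SPEC =====
def Spec_filter_anchor_dirs_py (anchors : List String) (allowed_roots : List String) (out : List String) : Prop := out = filter_anchor_dirs_py_alt anchors allowed_roots
instance (anchors : List String) (allowed_roots : List String) (out : List String) : Decidable (Spec_filter_anchor_dirs_py anchors allowed_roots out) := by unfold Spec_filter_anchor_dirs_py; infer_instance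

-- ===== CLAIM (what is proved, stated in full; the proofs are below) =====
def Claim_equal_filter_anchor_dirs_py : Prop := ∀ (anchors : List String) (allowed_roots : List String), Dom_filter_anchor_dirs_py anchors allowed_roots → Spec_filter_anchor_dirs_py anchors allowed_roots (filter_anchor_dirs_py anchors allowed_roots)

-- ===== LEMMAS AND PROOFS =====

theorem mem_bprefixes (cs r : List Char) :
    r ∈ bprefixes cs ↔ r = cs ∨ ∃ i, i < cs.length ∧ cs[i]? = some '/' ∧ r = cs.take i := by
  simp only [bprefixes, List.mem_append, List.mem_singleton, List.mem_filterMap, List.mem_range]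
  constructor
  · rintro (⟨i, hi, h⟩ | h)
    · split at h
      · exact Or.inr ⟨i, hi, by assumption, (Option.some_inj.mp h).symm⟩
      · exact absurd h (by simp)
    · exact Or.inl h
  · rintro (h | ⟨i, hi, hc, hr⟩)
    · exact Or.inr h
    · exact Or.inl ⟨i, hi, by simp [hc, hr]⟩

theorem match_iff_mem_bprefixes (cs r : List Char) :
    (cs = r ∨ (r ++ ['/']) <+: cs) ↔ r ∈ bprefixes cs := by
  rw [mem_bprefixes]
  constructor
  · rintro (h | ⟨t, ht⟩)
    · exact Or.inl h.symm
    · refine Or.inr ⟨r.length, ?_, ?_, ?_⟩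
      · subst ht; simp
      · subst ht; simp
      · subst ht; simp
  · rintro (h | ⟨i, hi, hc, hr⟩)
    · exact Or.inl h.symm
    · right
      refine ⟨cs.drop (i + 1), ?_⟩
      subst hr
      have hdrop : cs.drop i = '/' :: cs.drop (i + 1) := by
        rw [List.drop_eq_getElem_cons hi]
        simp only [List.getElem?_eq_getElem hi, Option.some_inj] at hc
        rw [hc]
      calc cs.take i ++ ['/'] ++ cs.drop (i + 1)
          = cs.take i ++ ('/' :: cs.drop (i + 1)) := by rw [List.append_assoc]; rfl
        _ = cs.take i ++ cs.drop i := by rw [hdrop]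
        _ = cs := List.take_append_drop i cs

-- the per-anchor conditions of the two ports agree
theorem cond_eq (norm : List (List Char)) (clean : List Char) :
    (norm.any (fun root => clean == root || PySem.Chars.startswith clean (root ++ ['/'])))
      = (bprefixes clean).any (fun p => PySem.Set.contains (PySem.Set.ofList norm) p) := by
  rw [Bool.eq_iff_iff]
  simp only [List.any_eq_true, Bool.or_eq_true, beq_iff_eq, PySem.Chars.startswith_iff,
    PySem.Set.contains_iff, PySem.Set.mem_ofList]
  constructor
  · rintro ⟨r, hr, hm⟩
    exact ⟨r, (match_iff_mem_bprefixes clean r).mp hm, hr⟩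
  · rintro ⟨p, hp, hm⟩
    exact ⟨p, hm, (match_iff_mem_bprefixes clean p).mpr hp⟩

-- the element A's loop keeps for an anchor, if any
def keepA (norm : List (List Char)) (anchor : String) : Option (List Char) :=
  if rstripSlash anchor.toList = [] then none
  else if norm.any (fun root => rstripSlash anchor.toList == root || PySem.Chars.startswith (rstripSlash anchor.toList) (root ++ ['/'])) then
    some (rstripSlash anchor.toList ++ ['/'])
  else none

-- the element B's loop keeps for an anchor, if any
def keepB (norm : List (List Char)) (anchor : String) : Option (List Char) :=
  if rstripSlash anchor.toList = [] then none
  else if (bprefixes (rstripSlash anchor.toList)).any (fun p => PySem.Set.contains (PySem.Set.ofList norm) p) then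
    some (rstripSlash anchor.toList ++ ['/'])
  else none

theorem keepA_eq_keepB (norm : List (List Char)) (anchor : String) :
    keepA norm anchor = keepB norm anchor := by
  simp only [keepA, keepB, cond_eq]

theorem foldlA_eq (norm : List (List Char)) (anchors : List String) (l : List (List Char)) :
    anchors.foldl (fun acc anchor =>
      if rstripSlash anchor.toList = [] then acc
      else if norm.any (fun root => rstripSlash anchor.toList == root || PySem.Chars.startswith (rstripSlash anchor.toList) (root ++ ['/'])) then
        acc ++ [rstripSlash anchor.toList ++ ['/']]
      else acc) l = l ++ anchors.filterMap (keepA norm) := by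
  induction anchors generalizing l with
  | nil => simp
  | cons a t ih =>
    by_cases h1 : rstripSlash a.toList = []
    · simp only [List.foldl_cons, List.filterMap_cons, keepA, if_pos h1, ih]
    · by_cases h2 : norm.any (fun root => rstripSlash a.toList == root || PySem.Chars.startswith (rstripSlash a.toList) (root ++ ['/'])) = true
      · simp only [List.foldl_cons, List.filterMap_cons, keepA, if_neg h1, if_pos h2, ih]
        simp
      · simp only [List.foldl_cons, List.filterMap_cons, keepA, if_neg h1, if_neg h2, ih]

theorem foldlB_eq (norm : List (List Char)) (anchors : List String) (s : PySem.Set (List Char)) :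
    anchors.foldl (fun acc anchor =>
      if rstripSlash anchor.toList = [] then acc
      else if (bprefixes (rstripSlash anchor.toList)).any (fun p => PySem.Set.contains (PySem.Set.ofList norm) p) then
        PySem.Set.add acc (rstripSlash anchor.toList ++ ['/'])
      else acc) s = PySem.Set.update s (anchors.filterMap (keepB norm)) := by
  induction anchors generalizing s with
  | nil => simp [PySem.Set.update]
  | cons a t ih =>
    by_cases h1 : rstripSlash a.toList = []
    · simp only [List.foldl_cons, List.filterMap_cons, keepB, if_pos h1, ih]
    · by_cases h2 : (bprefixes (rstripSlash a.toList)).any (fun p => PySem.Set.contains (PySem.Set.ofList norm) p) = true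
      · simp only [List.foldl_cons, List.filterMap_cons, keepB, if_neg h1, if_pos h2, ih]
        simp [PySem.Set.update]
      · simp only [List.foldl_cons, List.filterMap_cons, keepB, if_neg h1, if_neg h2, ih]

theorem keepB_nil (anchor : String) : keepB [] anchor = none := by
  simp only [keepB]
  split
  · rfl
  · split
    · rename_i hc
      simp [PySem.Set.ofList] at hc
    · rfl

-- ===== VERDICT (by name: the statement is the Claim_ definition above) =====
theorem filter_anchor_dirs_py_spec : Claim_equal_filter_anchor_dirs_py := by
  intro anchors allowed_roots _
  show filter_anchor_dirs_py anchors allowed_roots = filter_anchor_dirs_py_alt anchors allowed_roots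
  unfold filter_anchor_dirs_py filter_anchor_dirs_py_alt
  dsimp only
  set norm := (allowed_roots.filter (fun a => decide (a.toList ≠ []))).map (fun a => rstripSlash a.toList) with hnorm
  rw [foldlA_eq norm anchors, foldlB_eq norm anchors, PySem.Set.update_nil_left]
  have hk : anchors.filterMap (keepA norm) = anchors.filterMap (keepB norm) :=
    List.filterMap_congr (fun a _ => keepA_eq_keepB norm a)
  split
  · rename_i h
    rcases h with h | h
    · subst h; simp [PySem.List.sorted_eq_nil_iff]
    · subst h
      have hn : norm = [] := by simp [hnorm]
      rw [hn]
      rw [List.filterMap_eq_nil_iff.mpr (fun a _ => keepB_nil a)]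
      simp [PySem.List.sorted_eq_nil_iff, PySem.Set.ofList]
  · rw [hk]
    simp
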